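-- pv_equiv track=rewrite | github.com/bashrc2/AberMUSH | combat.py | _combat_ability_modifier
-- ===== SOURCE A (Python) =====
-- def _combat_ability_modifier(score: int) -> int:
--     """Returns the ability modifier
--     """
--     if score > 30:
--         return 10
--
--     # min and max score and the corresponding
--     # ability modifier
--     ability_table = (
--         [1, 1, -5],
--         [2, 3, -4],
--         [4, 5, -3],
--         [6, 7, -2],
--         [8, 9, -1],
--         [10, 11, 0],
--         [12, 13, 1],
--         [14, 15, 2],
--         [16, 17, 3],
--         [18, 19, 4],
--         [20, 21, 5],
--         [22, 23, 6],
--         [24, 25, 7],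
--         [26, 27, 8],
--         [28, 29, 9],
--         [30, 30, 10]
--     )
--
--     for ability_range in ability_table:
--         if score in range(ability_range[0], ability_range[1] + 1):
--             return ability_range[2]
--     return 0
-- ===== SOURCE B (Python) =====
-- def _combat_ability_modifier(score: int) -> int:
--     """Returns the ability modifier"""
--     if score < 1:
--         return 0
--     return max(-5, min(10, (score - 10) // 2))
-- ===== Notes on version B (the rewrite author's own statement) =====
-- stated objective: simpler
-- what changed: Replaced the lookup-table scan with the closed-form clamped formula max(-5, min(10, (score - 10) // 2)), keeping the explicit guard for sub-table scores.
import Mathlib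
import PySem

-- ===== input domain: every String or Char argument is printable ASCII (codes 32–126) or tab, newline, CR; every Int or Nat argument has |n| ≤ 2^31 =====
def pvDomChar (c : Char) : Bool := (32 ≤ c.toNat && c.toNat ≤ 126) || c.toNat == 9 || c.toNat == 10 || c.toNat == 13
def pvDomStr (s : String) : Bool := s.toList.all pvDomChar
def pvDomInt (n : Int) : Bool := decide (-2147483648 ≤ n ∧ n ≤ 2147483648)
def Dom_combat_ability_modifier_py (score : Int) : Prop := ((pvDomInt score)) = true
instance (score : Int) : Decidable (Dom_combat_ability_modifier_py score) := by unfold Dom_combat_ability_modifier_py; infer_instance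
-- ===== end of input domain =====

-- B replaces A's 16-row table scan with the closed-form clamped formula; objective: simpler.

-- ===== PORT A =====
-- the table of [min score, max score, modifier] rows
def pvAbilityTable : List (Int × Int × Int) :=
  [(1, 1, -5), (2, 3, -4), (4, 5, -3), (6, 7, -2), (8, 9, -1),
   (10, 11, 0), (12, 13, 1), (14, 15, 2), (16, 17, 3), (18, 19, 4),
   (20, 21, 5), (22, 23, 6), (24, 25, 7), (26, 27, 8), (28, 29, 9), (30, 30, 10)]

-- the for-loop: first row whose range contains score ('score in range(lo, hi+1)'), else 0
def pvScanTable (score : Int) : List (Int × Int × Int) → Int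
  | [] => 0
  | (lo, hi, m) :: rest => if lo ≤ score ∧ score < hi + 1 then m else pvScanTable score rest

def combat_ability_modifier_py (score : Int) : Int :=
  if score > 30 then 10
  else pvScanTable score pvAbilityTable

-- ===== PORT B =====
def combat_ability_modifier_py_alt (score : Int) : Int :=
  if score < 1 then 0
  else max (-5) (min 10 (PySem.Int.floordiv (score - 10) 2))

-- ===== PRECONDITION & SPEC =====
def Spec_combat_ability_modifier_py (score : Int) (out : Int) : Prop := out = combat_ability_modifier_py_alt score
instance (score : Int) (out : Int) : Decidable (Spec_combat_ability_modifier_py score out) := by unfold Spec_combat_ability_modifier_py; infer_instance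

-- ===== CLAIM (what is proved, stated in full; the proofs are below) =====
def Claim_equal_combat_ability_modifier_py : Prop := ∀ (score : Int), Dom_combat_ability_modifier_py score → Spec_combat_ability_modifier_py score (combat_ability_modifier_py score)

-- ===== LEMMAS AND PROOFS =====

-- ===== VERDICT (by name: the statement is the Claim_ definition above) =====
set_option maxHeartbeats 2000000 in
theorem combat_ability_modifier_py_spec : Claim_equal_combat_ability_modifier_py := by
  intro score _
  unfold Spec_combat_ability_modifier_py combat_ability_modifier_py combat_ability_modifier_py_alt
  rw [PySem.Int.floordiv_eq_ediv_of_pos (by norm_num)]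
  by_cases h30 : score > 30
  · simp [h30, show ¬ score < 1 by omega]
    omega
  · by_cases h1 : score < 1
    · simp only [if_neg h30, if_pos h1, pvAbilityTable, pvScanTable]
      norm_num
      omega
    · have hlo : (1:Int) ≤ score := by omega
      have hhi : score ≤ 30 := by omega
      interval_cases score <;> decide
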